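-- pv_equiv track=rewrite | github.com/AngeloAlfano11/DungeonMasterUtils | handlers/roll.py | _render_dice_fragment
-- ===== SOURCE A (Python) =====
-- def _render_dice_fragment(rolls: list[int], kept: set[int]) -> str:
--     """Build the parenthesized roll display, grouping discarded rolls into
--     spoiler blocks and absorbing adjacent `+` connectors. Leaves at least one
--     `+` visible between kept values when possible to convey summation."""
--     n = len(rolls)
--     if n == 0:
--         return "()"
--     if n == 1:
--         val = str(rolls[0])
--         return f"({val})" if 0 in kept else f"(<tg-spoiler>{val}</tg-spoiler>)"
--
--     # right_kept[i] = True if there's any kept index strictly greater than i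
--     right_kept = [False] * n
--     found = False
--     for i in range(n - 1, -1, -1):
--         right_kept[i] = found
--         if i in kept:
--             found = True
--
--     # Decide whether the "+" connector at position k (between rolls[k] and rolls[k+1]) is visible.
--     visible_plus = [False] * (n - 1)
--     for k in range(n - 1):
--         a_kept = k in kept
--         b_kept = (k + 1) in kept
--         if a_kept and b_kept:
--             visible_plus[k] = True
--         elif a_kept and not b_kept and right_kept[k + 1]:
--             # kept → discarded with another kept later: keep this "+" visible
--             visible_plus[k] = True
--
--     # Token stream as (text, hidden) pairs: each die value plus its trailing "+".
--     tokens: list[tuple[str, bool]] = []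
--     for i in range(n):
--         tokens.append((str(rolls[i]), i not in kept))
--         if i < n - 1:
--             tokens.append((" + ", not visible_plus[i]))
--
--     # Merge adjacent same-state tokens so each spoiler block is one tag.
--     merged: list[list] = []
--     for text, hidden in tokens:
--         if merged and merged[-1][1] == hidden:
--             merged[-1][0] += text
--         else:
--             merged.append([text, hidden])
--
--     # Render: hidden chunks become <tg-spoiler>...</tg-spoiler>; surrounding
--     # whitespace is moved outside the tag so the spoiler block tightly wraps
--     # only the content the user shouldn't see.
--     out: list[str] = []
--     for text, hidden in merged:
--         if hidden:
--             stripped = text.strip()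
--             leading_ws = text[: len(text) - len(text.lstrip())]
--             trailing_ws = text[len(text.rstrip()):]
--             out.append(leading_ws)
--             out.append(f"<tg-spoiler>{stripped}</tg-spoiler>")
--             out.append(trailing_ws)
--         else:
--             out.append(text)
--
--     return "(" + "".join(out) + ")"
-- ===== SOURCE B (Python) =====
-- def _render_dice_fragment(rolls: list[int], kept: set[int]) -> str:
--     """Positional tag placement: a closed-form visibility rule (connector k is
--     visible iff k is kept and k < last kept index) lets every <tg-spoiler>
--     open/close tag be emitted locally from neighbour flags, with no token
--     list, no run merging and no whitespace stripping."""
--     n = len(rolls)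
--     if n == 0:
--         return "()"
--     if n == 1:
--         val = str(rolls[0])
--         return f"({val})" if 0 in kept else f"(<tg-spoiler>{val}</tg-spoiler>)"
--
--     last_kept = max((i for i in kept if 0 <= i < n), default=-1)
--
--     def die_hidden(i):
--         return i not in kept
--
--     def conn_hidden(i):
--         return not (i in kept and i < last_kept)
--
--     parts = []
--     for i in range(n):
--         if die_hidden(i) and (i == 0 or not conn_hidden(i - 1)):
--             parts.append("<tg-spoiler>")
--         parts.append(str(rolls[i]))
--         if i == n - 1:
--             if die_hidden(i):
--                 parts.append("</tg-spoiler>")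
--         elif not conn_hidden(i):
--             parts.append(" + ")
--         else:
--             parts.append(" <tg-spoiler>+" if not die_hidden(i) else " +")
--             parts.append("</tg-spoiler> " if not die_hidden(i + 1) else " ")
--     return "(" + "".join(parts) + ")"
-- ===== Notes on version B (the rewrite author's own statement) =====
-- stated objective: alternative
-- what changed: Instead of A's token-stream pipeline (suffix scan, visibility table, token list, run merging, whitespace stripping of each merged run), B proves the connector rule collapses to 'k kept and k < last kept index' and places every <tg-spoiler> open/close tag positionally from neighbour flags in one loop, so no token list, no run merging and no strip/lstrip/rstrip ever happen.
import Mathlib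
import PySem

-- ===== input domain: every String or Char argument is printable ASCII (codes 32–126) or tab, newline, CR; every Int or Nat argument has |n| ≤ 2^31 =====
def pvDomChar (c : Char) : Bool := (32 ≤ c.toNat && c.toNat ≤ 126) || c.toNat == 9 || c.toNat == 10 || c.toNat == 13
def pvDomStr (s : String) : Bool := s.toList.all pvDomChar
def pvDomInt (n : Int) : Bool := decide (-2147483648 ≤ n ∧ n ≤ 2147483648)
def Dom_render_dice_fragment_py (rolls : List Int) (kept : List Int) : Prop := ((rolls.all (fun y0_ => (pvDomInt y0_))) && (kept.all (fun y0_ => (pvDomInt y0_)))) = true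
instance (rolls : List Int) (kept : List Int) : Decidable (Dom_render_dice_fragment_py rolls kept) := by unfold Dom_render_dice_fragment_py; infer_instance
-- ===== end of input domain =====

-- B renders the same display by a different algorithm: it proves the connector rule
-- collapses to 'k kept and k < last kept index' and emits every <tg-spoiler> open/close
-- tag positionally from neighbour flags in one loop — no token list, no run merging,
-- no whitespace stripping (objective: alternative).

-- ===== PORT A =====
def render_dice_fragment_py (rolls : List Int) (kept : List Int) : String :=
  let n : Int := PySem.List.len rolls
  if n == 0 then "()"
  else if n == 1 then
    let val := PySem.Int.toStr (PySem.List.pyGetD rolls 0 0)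
    if kept.contains 0 then "(" ++ val ++ ")"
    else "(<tg-spoiler>" ++ val ++ "</tg-spoiler>)"
  else
    -- right_kept backward pass
    let right_kept : List Bool :=
      ((PySem.List.pyRange (n - 1) (-1) (-1)).foldl
        (fun (s : List Bool × Bool) i =>
          (PySem.List.pySetD s.1 i s.2, if kept.contains i then true else s.2))
        (List.replicate n.toNat false, false)).1
    -- visible_plus pass
    let visible_plus : List Bool :=
      (PySem.List.pyRange 0 (n - 1)).foldl
        (fun vp k =>
          let a_kept := kept.contains k
          let b_kept := kept.contains (k + 1)
          if a_kept && b_kept then PySem.List.pySetD vp k true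
          else if a_kept && !b_kept && PySem.List.pyGetD right_kept (k + 1) false then
            PySem.List.pySetD vp k true
          else vp)
        (List.replicate (n - 1).toNat false)
    -- token stream
    let tokens : List (String × Bool) :=
      (PySem.List.pyRange 0 n).foldl
        (fun (tks : List (String × Bool)) i =>
          let tks := tks ++ [(PySem.Int.toStr (PySem.List.pyGetD rolls i 0), !(kept.contains i))]
          if i < n - 1 then tks ++ [(" + ", !(PySem.List.pyGetD visible_plus i false))] else tks)
        []
    -- merge adjacent same-state tokens
    let merged : List (String × Bool) :=
      tokens.foldl
        (fun (m : List (String × Bool)) tb =>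
          match m.getLast? with
          | some last => if last.2 == tb.2 then m.dropLast ++ [(last.1 ++ tb.1, last.2)] else m ++ [tb]
          | none => m ++ [tb])
        []
    -- render
    let out : List String :=
      merged.foldl
        (fun (o : List String) tb =>
          if tb.2 then
            let stripped := PySem.Str.strip tb.1
            let leading_ws := PySem.Str.slice tb.1 none (some (PySem.Str.len tb.1 - PySem.Str.len (PySem.Str.lstrip tb.1)))
            let trailing_ws := PySem.Str.slice tb.1 (some (PySem.Str.len (PySem.Str.rstrip tb.1))) none
            o ++ [leading_ws] ++ ["<tg-spoiler>" ++ stripped ++ "</tg-spoiler>"] ++ [trailing_ws]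
          else o ++ [tb.1])
        []
    "(" ++ PySem.Str.join "" out ++ ")"

-- ===== PORT B =====
def render_dice_fragment_py_alt (rolls : List Int) (kept : List Int) : String :=
  let n : Int := PySem.List.len rolls
  if n == 0 then "()"
  else if n == 1 then
    let val := PySem.Int.toStr (PySem.List.pyGetD rolls 0 0)
    if kept.contains 0 then "(" ++ val ++ ")"
    else "(<tg-spoiler>" ++ val ++ "</tg-spoiler>)"
  else
    let last_kept : Int :=
      (PySem.List.max? (kept.filter (fun i => decide (0 ≤ i) && decide (i < n))) (fun i => i)).getD (-1)
    let die_hidden := fun (i : Int) => !(kept.contains i)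
    let conn_hidden := fun (i : Int) => !(kept.contains i && decide (i < last_kept))
    let parts : List String :=
      (PySem.List.pyRange 0 n).foldl
        (fun (ps : List String) i =>
          let ps := if die_hidden i && (i == 0 || !(conn_hidden (i - 1))) then ps ++ ["<tg-spoiler>"] else ps
          let ps := ps ++ [PySem.Int.toStr (PySem.List.pyGetD rolls i 0)]
          if i == n - 1 then
            (if die_hidden i then ps ++ ["</tg-spoiler>"] else ps)
          else if !(conn_hidden i) then ps ++ [" + "]
          else
            (ps ++ [if !(die_hidden i) then " <tg-spoiler>+" else " +"]) ++
              [if !(die_hidden (i + 1)) then "</tg-spoiler> " else " "])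
        []
    "(" ++ PySem.Str.join "" parts ++ ")"

-- ===== PRECONDITION & SPEC =====
def Spec_render_dice_fragment_py (rolls : List Int) (kept : List Int) (out : String) : Prop := out = render_dice_fragment_py_alt rolls kept
instance (rolls : List Int) (kept : List Int) (out : String) : Decidable (Spec_render_dice_fragment_py rolls kept out) := by unfold Spec_render_dice_fragment_py; infer_instance

-- ===== CLAIM (what is proved, stated in full; the proofs are below) =====
def Claim_equal_render_dice_fragment_py : Prop := ∀ (rolls : List Int) (kept : List Int), Dom_render_dice_fragment_py rolls kept → Spec_render_dice_fragment_py rolls kept (render_dice_fragment_py rolls kept)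

-- ===== LEMMAS AND PROOFS =====

-- ---- proof-side abbreviations ----

-- "some kept index i with j < i < N"
def pvHKA (kept : List Int) (N j : Int) : Bool :=
  kept.any fun i => decide (j < i) && decide (i < N)

-- B's last_kept
def pvLK (kept : List Int) (N : Int) : Int :=
  (PySem.List.max? (kept.filter (fun i => decide (0 ≤ i) && decide (i < N))) (fun i => i)).getD (-1)

-- A's connector-visibility formula
def pvVisA (kept : List Int) (N j : Int) : Bool :=
  (kept.contains j && kept.contains (j + 1)) ||
    (kept.contains j && !(kept.contains (j + 1)) && pvHKA kept N (j + 1))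

-- B's flags
def pvHd (kept : List Int) (i : Int) : Bool := !(kept.contains i)
def pvGc (kept : List Int) (lk i : Int) : Bool := !(kept.contains i && decide (i < lk))

-- the visibility A computes from right_kept, phrased with last_kept
def pvVis (kept : List Int) (lk i : Int) : Bool :=
  kept.contains i && (kept.contains (i + 1) || decide (i + 1 < lk))

def pvStr (rolls : List Int) (i : Int) : String :=
  PySem.Int.toStr (PySem.List.pyGetD rolls i 0)

-- per-index token emission (A's token stream)
def pvEmit (rolls kept : List Int) (N lk i : Int) : List (String × Bool) :=
  (pvStr rolls i, !(kept.contains i)) ::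
    (if i < N - 1 then [(" + ", !(pvVis kept lk i))] else [])

-- the same token stream with the simplified connector flag
def pvTok (rolls kept : List Int) (lk N i : Int) : List (String × Bool) :=
  (pvStr rolls i, pvHd kept i) ::
    (if i < N - 1 then [(" + ", pvGc kept lk i)] else [])

-- B's per-index output pieces
def pvPiece (rolls kept : List Int) (lk N i : Int) : List String :=
  (if pvHd kept i && (i == 0 || !(pvGc kept lk (i - 1))) then ["<tg-spoiler>"] else []) ++
  ([pvStr rolls i] ++
    (if i == N - 1 then (if pvHd kept i then ["</tg-spoiler>"] else [])
     else if !(pvGc kept lk i) then [" + "]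
     else [(if !(pvHd kept i) then " <tg-spoiler>+" else " +"),
           (if !(pvHd kept (i + 1)) then "</tg-spoiler> " else " ")]))

-- A's merge / render steps
def pvMergeStep (m : List (String × Bool)) (tb : String × Bool) : List (String × Bool) :=
  match m.getLast? with
  | some last => if last.2 == tb.2 then m.dropLast ++ [(last.1 ++ tb.1, last.2)] else m ++ [tb]
  | none => m ++ [tb]

def pvRenderStep (o : List String) (tb : String × Bool) : List String :=
  if tb.2 then
    let stripped := PySem.Str.strip tb.1
    let leading_ws := PySem.Str.slice tb.1 none (some (PySem.Str.len tb.1 - PySem.Str.len (PySem.Str.lstrip tb.1)))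
    let trailing_ws := PySem.Str.slice tb.1 (some (PySem.Str.len (PySem.Str.rstrip tb.1))) none
    o ++ [leading_ws] ++ ["<tg-spoiler>" ++ stripped ++ "</tg-spoiler>"] ++ [trailing_ws]
  else o ++ [tb.1]

def pvRenderChunk (tb : String × Bool) : String :=
  if tb.2 then
    PySem.Str.slice tb.1 none (some (PySem.Str.len tb.1 - PySem.Str.len (PySem.Str.lstrip tb.1)))
      ++ "<tg-spoiler>" ++ PySem.Str.strip tb.1 ++ "</tg-spoiler>"
      ++ PySem.Str.slice tb.1 (some (PySem.Str.len (PySem.Str.rstrip tb.1))) none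
  else tb.1

-- rendered text of a merged-run list
def pvJR (m : List (String × Bool)) : String :=
  PySem.Str.join "" (m.foldl pvRenderStep [])

-- B's output prefix for indices < a
def pvE (rolls kept : List Int) (lk N a : Int) : String :=
  PySem.Str.join "" ((PySem.List.pyRange 0 a).flatMap (pvPiece rolls kept lk N))

-- A's merged-run list for indices < a
def pvM (rolls kept : List Int) (lk N a : Int) : List (String × Bool) :=
  List.foldl pvMergeStep [] ((PySem.List.pyRange 0 a).flatMap (pvTok rolls kept lk N))

-- nonempty, and no whitespace at either end
def pvWordish (S : String) : Prop :=
  S.toList ≠ [] ∧ (∀ c, S.toList.head? = some c → PySem.Chars.isspace c = false) ∧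
    (∀ c, S.toList.getLast? = some c → PySem.Chars.isspace c = false)

-- the run invariant: after consuming tokens of indices < a (1 ≤ a ≤ N-1),
-- A's merged list m matches B's emitted prefix pvE … a
def pvInv (rolls kept : List Int) (lk N a : Int) (m : List (String × Bool)) : Prop :=
  (pvGc kept lk (a - 1) = false ∧ ∃ m₀ v, m = m₀ ++ [(v, false)] ∧
      pvE rolls kept lk N a = pvJR m₀ ++ v) ∨
  (pvGc kept lk (a - 1) = true ∧ pvHd kept a = true ∧ ∃ m₀ L S,
      (L = "" ∨ L = " ") ∧ pvWordish S ∧ m = m₀ ++ [(L ++ S ++ " ", true)] ∧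
      pvE rolls kept lk N a = pvJR m₀ ++ L ++ "<tg-spoiler>" ++ S ++ " ") ∨
  (pvGc kept lk (a - 1) = true ∧ pvHd kept a = false ∧ ∃ m₀ L S,
      (L = "" ∨ L = " ") ∧ pvWordish S ∧ m = m₀ ++ [(L ++ S ++ " ", true)] ∧
      pvE rolls kept lk N a = pvJR m₀ ++ L ++ "<tg-spoiler>" ++ S ++ "</tg-spoiler> ")

-- ---- string/join lemmas ----

theorem pv_join_chars_snoc (ps : List (List Char)) (p : List Char) :
    PySem.Chars.join [] (ps ++ [p]) = PySem.Chars.join [] ps ++ p := by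
  induction ps with
  | nil => simp [PySem.Chars.join_nil, PySem.Chars.join_singleton]
  | cons q ps ih =>
    cases ps with
    | nil => simp [PySem.Chars.join_singleton, PySem.Chars.join_cons_cons]
    | cons r rs =>
      simp only [List.cons_append] at ih ⊢
      rw [PySem.Chars.join_cons_cons, PySem.Chars.join_cons_cons, ih]
      simp [List.append_assoc]

theorem pv_join_snoc (l : List String) (x : String) :
    PySem.Str.join "" (l ++ [x]) = PySem.Str.join "" l ++ x := by
  apply String.toList_inj.mp
  simp [PySem.Str.toList_join, pv_join_chars_snoc]

theorem pv_join_append (l1 l2 : List String) :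
    PySem.Str.join "" (l1 ++ l2) = PySem.Str.join "" l1 ++ PySem.Str.join "" l2 := by
  induction l2 using List.reverseRecOn with
  | nil => apply String.toList_inj.mp; simp [PySem.Str.toList_join]
  | append_singleton xs x ih =>
    rw [show l1 ++ (xs ++ [x]) = (l1 ++ xs) ++ [x] by simp, pv_join_snoc, ih, pv_join_snoc]
    apply String.toList_inj.mp; simp

theorem pv_join_one (x : String) : PySem.Str.join "" [x] = x := by
  apply String.toList_inj.mp
  simp [PySem.Str.toList_join, PySem.Chars.join_singleton]

theorem pv_join_two (x y : String) : PySem.Str.join "" [x, y] = x ++ y := by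
  rw [show [x, y] = [x] ++ [y] from rfl, pv_join_append, pv_join_one, pv_join_one]

theorem pv_join_three (x y z : String) : PySem.Str.join "" [x, y, z] = x ++ y ++ z := by
  rw [show [x, y, z] = [x, y] ++ [z] from rfl, pv_join_append, pv_join_two, pv_join_one]

theorem pv_toDigitsCore_ne_nil (b f n : Nat) (acc : List Char) (h : acc ≠ [] ∨ 0 < f) :
    Nat.toDigitsCore b f n acc ≠ [] := by
  induction f generalizing n acc with
  | zero =>
    simp only [Nat.toDigitsCore]
    rcases h with h | h
    · exact h
    · omega
  | succ f ih =>
    simp only [Nat.toDigitsCore]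
    split
    · simp
    · apply ih; left; simp

theorem pv_digitChar_nonspace (d : Nat) : PySem.Chars.isspace (Nat.digitChar d) = false := by
  rcases Nat.lt_or_ge d 16 with h | h
  · interval_cases d <;> decide
  · have hd : Nat.digitChar d = '*' := by
      unfold Nat.digitChar
      repeat rw [if_neg (by omega)]
    rw [hd]; decide

theorem pv_toDigitsCore_nonspace (b f n : Nat) (acc : List Char)
    (hacc : ∀ c ∈ acc, PySem.Chars.isspace c = false) :
    ∀ c ∈ Nat.toDigitsCore b f n acc, PySem.Chars.isspace c = false := by
  induction f generalizing n acc with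
  | zero => simpa [Nat.toDigitsCore] using hacc
  | succ f ih =>
    simp only [Nat.toDigitsCore]
    split
    · intro c hc
      rcases List.mem_cons.mp hc with h | h
      · subst h; exact pv_digitChar_nonspace _
      · exact hacc c h
    · apply ih
      intro c hc
      rcases List.mem_cons.mp hc with h | h
      · subst h; exact pv_digitChar_nonspace _
      · exact hacc c h

theorem pv_toStr_nonspace (n : Int) :
    ∀ c ∈ (PySem.Int.toStr n).toList, PySem.Chars.isspace c = false := by
  rw [PySem.Int.toList_toStr]
  unfold PySem.Int.toChars
  split
  · intro c hc
    rcases List.mem_cons.mp hc with h | h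
    · subst h; decide
    · exact pv_toDigitsCore_nonspace _ _ _ _ (by simp) c h
  · exact pv_toDigitsCore_nonspace _ _ _ _ (by simp)

theorem pv_toStr_toList_ne_nil (n : Int) : (PySem.Int.toStr n).toList ≠ [] := by
  rw [PySem.Int.toList_toStr]
  unfold PySem.Int.toChars
  split
  · simp
  · unfold Nat.toDigits
    exact pv_toDigitsCore_ne_nil _ _ _ _ (Or.inr (Nat.succ_pos _))

theorem pv_head?_mem {α : Type} {l : List α} {a : α} (h : l.head? = some a) : a ∈ l := by
  cases l with
  | nil => simp at h
  | cons x xs => simp at h; subst h; exact List.mem_cons_self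

theorem pv_getLast?_mem {α : Type} {l : List α} {a : α} (h : l.getLast? = some a) : a ∈ l := by
  rw [← List.head?_reverse] at h
  exact List.mem_reverse.mp (pv_head?_mem h)

theorem pv_head?_app {α : Type} (l1 l2 : List α) (h : l1 ≠ []) :
    (l1 ++ l2).head? = l1.head? := by
  cases l1 with
  | nil => exact absurd rfl h
  | cons a t => rfl

theorem pv_getLast?_app {α : Type} (l1 l2 : List α) (h : l2 ≠ []) :
    (l1 ++ l2).getLast? = l2.getLast? := by
  rw [List.getLast?_append]
  cases hg : l2.getLast? with
  | none => exact absurd (List.getLast?_eq_none_iff.mp hg) h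
  | some a => rfl

theorem pv_wordish_of_nonspace (S : String) (hne : S.toList ≠ [])
    (hall : ∀ c ∈ S.toList, PySem.Chars.isspace c = false) : pvWordish S :=
  ⟨hne, fun c hc => hall c (pv_head?_mem hc), fun c hc => hall c (pv_getLast?_mem hc)⟩

theorem pv_wordish_str (rolls : List Int) (i : Int) : pvWordish (pvStr rolls i) :=
  pv_wordish_of_nonspace _ (pv_toStr_toList_ne_nil _) (pv_toStr_nonspace _)

theorem pv_wordish_plus : pvWordish "+" := by
  refine pv_wordish_of_nonspace _ (by decide) ?_
  intro c hc
  have : c = '+' := by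
    have h : ("+" : String).toList = ['+'] := by decide
    rw [h] at hc; simpa using hc
  subst this; decide

theorem pv_toList_ne_nil_append (S T : String) (h : S.toList ≠ []) :
    (S ++ T).toList ≠ [] := by
  simp only [String.toList_append]
  intro hc
  exact h (List.append_eq_nil_iff.mp hc).1

theorem pv_wordish_snoc_plus (S : String) (h : pvWordish S) : pvWordish (S ++ " +") := by
  obtain ⟨hne, hh, hl⟩ := h
  refine ⟨pv_toList_ne_nil_append _ _ hne, ?_, ?_⟩
  · intro c hc
    rw [String.toList_append, pv_head?_app _ _ hne] at hc
    exact hh c hc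
  · intro c hc
    rw [String.toList_append, pv_getLast?_app _ _ (by decide)] at hc
    have h2 : (" +" : String).toList = [' ', '+'] := by decide
    rw [h2] at hc
    simp at hc
    subst hc; decide

theorem pv_wordish_mid (S d : String) (hS : pvWordish S) (hd : pvWordish d) :
    pvWordish (S ++ " " ++ d) := by
  obtain ⟨hne, hh, _⟩ := hS
  obtain ⟨dne, _, dl⟩ := hd
  have hne2 : (S.toList ++ (" " : String).toList) ≠ [] := by
    intro h; exact hne (List.append_eq_nil_iff.mp h).1
  refine ⟨?_, ?_, ?_⟩
  · simp only [String.toList_append]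
    intro hc
    exact dne ((List.append_eq_nil_iff.mp hc).2)
  · intro c hc
    rw [String.toList_append, String.toList_append, pv_head?_app _ _ hne2,
      pv_head?_app _ _ hne] at hc
    exact hh c hc
  · intro c hc
    rw [String.toList_append, pv_getLast?_app _ _ dne] at hc
    exact dl c hc

-- ---- lstrip/rstrip/strip on decomposed runs ----

theorem pv_lstrip_skip (L rest : List Char) (hL : L = [] ∨ L = [' '])
    (hrest : ∀ c, rest.head? = some c → PySem.Chars.isspace c = false) :
    PySem.Chars.lstrip (L ++ rest) = rest := by
  have hbody : PySem.Chars.lstrip rest = rest := by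
    cases rest with
    | nil => rfl
    | cons c cs =>
      have := hrest c rfl
      simp [PySem.Chars.lstrip, List.dropWhile_cons, this]
  rcases hL with h | h <;> subst h
  · simpa using hbody
  · simpa [PySem.Chars.lstrip, List.dropWhile_cons, show PySem.Chars.isspace ' ' = true from by decide]
      using hbody

theorem pv_rstrip_skip (rest T : List Char) (hT : T = [] ∨ T = [' '])
    (hrest : ∀ c, rest.getLast? = some c → PySem.Chars.isspace c = false) :
    PySem.Chars.rstrip (rest ++ T) = rest := by
  have hbody : List.dropWhile PySem.Chars.isspace rest.reverse = rest.reverse := by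
    cases hr : rest.reverse with
    | nil => rfl
    | cons c cs =>
      have hc : rest.getLast? = some c := by
        rw [← List.head?_reverse, hr]; rfl
      have := hrest c hc
      simp [List.dropWhile_cons, this]
  rcases hT with h | h <;> subst h
  · simp only [List.append_nil]
    unfold PySem.Chars.rstrip
    rw [hbody, List.reverse_reverse]
  · unfold PySem.Chars.rstrip
    rw [List.reverse_append]
    simp only [List.reverse_singleton, List.singleton_append]
    rw [List.dropWhile_cons]
    simp only [show PySem.Chars.isspace ' ' = true from by decide, if_pos]
    rw [hbody, List.reverse_reverse]

-- the key rendering lemma: a hidden chunk of shape L ++ S ++ T (L, T each "" or " ",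
-- S nonempty with non-space ends) renders with the whitespace moved outside the tag
theorem pv_renderChunk_decomp (s L S T : String)
    (hsplit : s.toList = L.toList ++ S.toList ++ T.toList)
    (hL : L = "" ∨ L = " ") (hT : T = "" ∨ T = " ") (hS : pvWordish S) :
    pvRenderChunk (s, true) = L ++ "<tg-spoiler>" ++ S ++ "</tg-spoiler>" ++ T := by
  obtain ⟨hne, hh, hl⟩ := hS
  have hL' : L.toList = [] ∨ L.toList = [' '] := by
    rcases hL with h | h <;> subst h
    · left; decide
    · right; decide
  have hT' : T.toList = [] ∨ T.toList = [' '] := by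
    rcases hT with h | h <;> subst h
    · left; decide
    · right; decide
  have hheadST : ∀ c, (S.toList ++ T.toList).head? = some c → PySem.Chars.isspace c = false := by
    intro c hc
    rw [pv_head?_app _ _ hne] at hc
    exact hh c hc
  have hlastLS : ∀ c, (L.toList ++ S.toList).getLast? = some c → PySem.Chars.isspace c = false := by
    intro c hc
    rw [pv_getLast?_app _ _ hne] at hc
    exact hl c hc
  have hlstrip : PySem.Chars.lstrip s.toList = S.toList ++ T.toList := by
    rw [hsplit, List.append_assoc]
    exact pv_lstrip_skip _ _ hL' hheadST
  have hrstrip : PySem.Chars.rstrip s.toList = L.toList ++ S.toList := by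
    rw [hsplit]
    exact pv_rstrip_skip _ _ hT' hlastLS
  have hstrip : PySem.Chars.strip s.toList = S.toList := by
    unfold PySem.Chars.strip
    rw [hlstrip]
    exact pv_rstrip_skip _ _ hT' (fun c hc => hl c hc)
  -- lengths
  have hlenL : PySem.Str.len s - PySem.Str.len (PySem.Str.lstrip s) = (L.toList.length : Int) := by
    unfold PySem.Str.len
    rw [PySem.Str.toList_lstrip, hlstrip, hsplit]
    simp [List.length_append]
  have hlenLS : PySem.Str.len (PySem.Str.rstrip s) = ((L.toList ++ S.toList).length : Int) := by
    unfold PySem.Str.len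
    rw [PySem.Str.toList_rstrip, hrstrip]
  unfold pvRenderChunk
  simp only [if_pos]
  apply String.toList_inj.mp
  simp only [String.toList_append, PySem.Str.toList_slice, PySem.Chars.slice_eq_listSlice,
    PySem.Str.toList_strip, hstrip, hlenL, hlenLS]
  rw [PySem.List.slice_to _ (by positivity), PySem.List.slice_from _ (by positivity)]
  rw [hsplit]
  rw [Int.toNat_natCast, Int.toNat_natCast]
  have htake : List.take L.toList.length (L.toList ++ S.toList ++ T.toList) = L.toList := by
    rw [List.append_assoc, List.take_left]
  have hdrop : List.drop (L.toList ++ S.toList).length (L.toList ++ S.toList ++ T.toList)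
      = T.toList := List.drop_left
  rw [htake, hdrop]

-- ---- render-fold lemmas ----

theorem pv_renderStep_join (o : List String) (tb : String × Bool) :
    PySem.Str.join "" (pvRenderStep o tb) = PySem.Str.join "" o ++ pvRenderChunk tb := by
  unfold pvRenderStep pvRenderChunk
  by_cases h : tb.2
  · simp only [h, if_pos]
    rw [show o ++ [PySem.Str.slice tb.1 none (some (PySem.Str.len tb.1 - PySem.Str.len (PySem.Str.lstrip tb.1)))]
        ++ ["<tg-spoiler>" ++ PySem.Str.strip tb.1 ++ "</tg-spoiler>"]
        ++ [PySem.Str.slice tb.1 (some (PySem.Str.len (PySem.Str.rstrip tb.1))) none]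
      = (o ++ [PySem.Str.slice tb.1 none (some (PySem.Str.len tb.1 - PySem.Str.len (PySem.Str.lstrip tb.1)))]
        ++ ["<tg-spoiler>" ++ PySem.Str.strip tb.1 ++ "</tg-spoiler>"])
        ++ [PySem.Str.slice tb.1 (some (PySem.Str.len (PySem.Str.rstrip tb.1))) none] from by simp,
      pv_join_snoc]
    rw [show o ++ [PySem.Str.slice tb.1 none (some (PySem.Str.len tb.1 - PySem.Str.len (PySem.Str.lstrip tb.1)))]
        ++ ["<tg-spoiler>" ++ PySem.Str.strip tb.1 ++ "</tg-spoiler>"]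
      = (o ++ [PySem.Str.slice tb.1 none (some (PySem.Str.len tb.1 - PySem.Str.len (PySem.Str.lstrip tb.1)))])
        ++ ["<tg-spoiler>" ++ PySem.Str.strip tb.1 ++ "</tg-spoiler>"] from by simp,
      pv_join_snoc, pv_join_snoc]
    simp [String.append_assoc]
  · simp [h, pv_join_snoc]

theorem pv_renderFold_snoc (m : List (String × Bool)) (last : String × Bool) :
    PySem.Str.join "" ((m ++ [last]).foldl pvRenderStep []) =
      PySem.Str.join "" (m.foldl pvRenderStep []) ++ pvRenderChunk last := by
  rw [List.foldl_append]
  simp [pv_renderStep_join]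

theorem pv_jr_snoc_vis (m₀ : List (String × Bool)) (v : String) :
    pvJR (m₀ ++ [(v, false)]) = pvJR m₀ ++ v := by
  unfold pvJR
  rw [pv_renderFold_snoc]
  simp [pvRenderChunk]

theorem pv_jr_snoc_hid (m₀ : List (String × Bool)) (B : String) :
    pvJR (m₀ ++ [(B, true)]) = pvJR m₀ ++ pvRenderChunk (B, true) := by
  unfold pvJR
  rw [pv_renderFold_snoc]

-- ---- merge-step lemmas ----

theorem pv_merge_nil (tb : String × Bool) : pvMergeStep [] tb = [tb] := rfl

theorem pv_merge_same (m₀ : List (String × Bool)) (v t : String) (f : Bool) :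
    pvMergeStep (m₀ ++ [(v, f)]) (t, f) = m₀ ++ [(v ++ t, f)] := by
  unfold pvMergeStep
  rw [List.getLast?_concat]
  simp

theorem pv_merge_diff (m₀ : List (String × Bool)) (v t : String) (f g : Bool) (h : f ≠ g) :
    pvMergeStep (m₀ ++ [(v, f)]) (t, g) = m₀ ++ [(v, f), (t, g)] := by
  unfold pvMergeStep
  rw [List.getLast?_concat]
  simp [h]

-- ---- prefix recurrences ----

theorem pv_E_succ (rolls kept : List Int) (lk N a : Int) (ha : 0 ≤ a) :
    pvE rolls kept lk N (a + 1) =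
      pvE rolls kept lk N a ++ PySem.Str.join "" (pvPiece rolls kept lk N a) := by
  unfold pvE
  rw [PySem.List.pyRange_one_succ_right ha, List.flatMap_append, pv_join_append]
  simp

theorem pv_M_succ (rolls kept : List Int) (lk N a : Int) (ha : 0 ≤ a) :
    pvM rolls kept lk N (a + 1) =
      List.foldl pvMergeStep (pvM rolls kept lk N a) (pvTok rolls kept lk N a) := by
  unfold pvM
  rw [PySem.List.pyRange_one_succ_right ha, List.flatMap_append, List.foldl_append]
  simp

theorem pv_hd_imp_gc (kept : List Int) (lk i : Int) (h : pvHd kept i = true) :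
    pvGc kept lk i = true := by
  unfold pvHd at h
  unfold pvGc
  simp only [Bool.not_eq_true'] at h
  rw [h]
  rfl


theorem pv_jr_nil : pvJR [] = "" := rfl

theorem pv_tl_empty : ("" : String).toList = [] := by decide
theorem pv_tl_spc : (" " : String).toList = [' '] := by decide
theorem pv_tl_plus : ("+" : String).toList = ['+'] := by decide
theorem pv_tl_pp : (" + " : String).toList = [' ', '+', ' '] := by decide
theorem pv_tl_sp : (" +" : String).toList = [' ', '+'] := by decide
theorem pv_tl_ctagsp : ("</tg-spoiler> " : String).toList
    = ("</tg-spoiler>" : String).toList ++ [' '] := by decide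
theorem pv_tl_open : (" <tg-spoiler>+" : String).toList
    = [' '] ++ ("<tg-spoiler>" : String).toList ++ ['+'] := by decide

theorem pv_join_four (x y z w : String) :
    PySem.Str.join "" [x, y, z, w] = x ++ y ++ z ++ w := by
  rw [show [x, y, z, w] = [x, y, z] ++ [w] from rfl, pv_join_append, pv_join_three, pv_join_one]

theorem pv_merge_one_same (x t : String) (f : Bool) :
    pvMergeStep [(x, f)] (t, f) = [(x ++ t, f)] := by
  simpa using pv_merge_same [] x t f

theorem pv_merge_one_diff (x t : String) (f g : Bool) (h : f ≠ g) :
    pvMergeStep [(x, f)] (t, g) = [(x, f), (t, g)] := by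
  simpa using pv_merge_diff [] x t f g h

-- ---- the invariant: base, step, final ----

set_option maxHeartbeats 1000000 in
theorem pv_inv_base (rolls kept : List Int) (lk N : Int) (hN : 2 ≤ N) :
    pvInv rolls kept lk N 1 (pvM rolls kept lk N 1) := by
  have h0N : (0 : Int) < N - 1 := by omega
  have h0N' : ((0 : Int) == N - 1) = false := beq_eq_false_iff_ne.mpr (by omega)
  have hr : PySem.List.pyRange (0 : Int) 1 = [(0 : Int)] := by
    have h := PySem.List.pyRange_one_singleton (a := (0 : Int))
    norm_num at h
    exact h
  have hM1 : pvM rolls kept lk N 1 = List.foldl pvMergeStep [] (pvTok rolls kept lk N 0) := by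
    unfold pvM
    rw [hr]
    simp
  have hE1 : pvE rolls kept lk N 1 = PySem.Str.join "" (pvPiece rolls kept lk N 0) := by
    unfold pvE
    rw [hr]
    simp
  have htok : pvTok rolls kept lk N 0 = [(pvStr rolls 0, pvHd kept 0), ((" + " : String), pvGc kept lk 0)] := by
    unfold pvTok
    rw [if_pos h0N]
  unfold pvInv
  rw [show (1 : Int) - 1 = 0 from by ring, hM1, htok]
  simp only [List.foldl_cons, List.foldl_nil, pv_merge_nil]
  cases hhd : pvHd kept 0 with
  | false =>
    cases hgc : pvGc kept lk 0 with
    | false =>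
      left
      rw [pv_merge_one_same]
      refine ⟨rfl, [], pvStr rolls 0 ++ " + ", rfl, ?_⟩
      have hp : pvPiece rolls kept lk N 0 = [pvStr rolls 0, " + "] := by
        simp [pvPiece, hhd, hgc, h0N']
      rw [hE1, hp, pv_join_two, pv_jr_nil]
      apply String.toList_inj.mp; simp
    | true =>
      rw [pv_merge_one_diff _ _ _ _ (by simp)]
      cases hh1 : pvHd kept 1 with
      | true =>
        right; left
        refine ⟨rfl, rfl, [(pvStr rolls 0, false)], " ", "+", Or.inr rfl, pv_wordish_plus, ?_, ?_⟩
        · rw [show ((" " : String) ++ "+" ++ " ") = " + " from by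
            apply String.toList_inj.mp; simp [pv_tl_spc, pv_tl_plus, pv_tl_pp]]
          simp
        · have hp : pvPiece rolls kept lk N 0 = [pvStr rolls 0, " <tg-spoiler>+", " "] := by
            simp [pvPiece, hhd, hgc, h0N', hh1]
          rw [hE1, hp, pv_join_three,
            show ([(pvStr rolls 0, false)] : List (String × Bool)) = [] ++ [(pvStr rolls 0, false)] from by simp,
            pv_jr_snoc_vis, pv_jr_nil]
          apply String.toList_inj.mp
          simp [pv_tl_spc, pv_tl_open]
      | false =>
        right; right
        refine ⟨rfl, rfl, [(pvStr rolls 0, false)], " ", "+", Or.inr rfl, pv_wordish_plus, ?_, ?_⟩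
        · rw [show ((" " : String) ++ "+" ++ " ") = " + " from by
            apply String.toList_inj.mp; simp [pv_tl_spc, pv_tl_plus, pv_tl_pp]]
          simp
        · have hp : pvPiece rolls kept lk N 0 = [pvStr rolls 0, " <tg-spoiler>+", "</tg-spoiler> "] := by
            simp [pvPiece, hhd, hgc, h0N', hh1]
          rw [hE1, hp, pv_join_three,
            show ([(pvStr rolls 0, false)] : List (String × Bool)) = [] ++ [(pvStr rolls 0, false)] from by simp,
            pv_jr_snoc_vis, pv_jr_nil]
          apply String.toList_inj.mp
          simp [pv_tl_spc, pv_tl_open, pv_tl_ctagsp]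
  | true =>
    have hgc : pvGc kept lk 0 = true := pv_hd_imp_gc kept lk 0 hhd
    rw [hgc, pv_merge_one_same]
    cases hh1 : pvHd kept 1 with
    | true =>
      right; left
      refine ⟨rfl, rfl, [], "", pvStr rolls 0 ++ " +", Or.inl rfl,
        pv_wordish_snoc_plus _ (pv_wordish_str rolls 0), ?_, ?_⟩
      · rw [show (("" : String) ++ (pvStr rolls 0 ++ " +") ++ " ") = pvStr rolls 0 ++ " + " from by
          apply String.toList_inj.mp; simp [pv_tl_empty, pv_tl_sp, pv_tl_spc, pv_tl_pp]]
        simp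
      · have hp : pvPiece rolls kept lk N 0 = ["<tg-spoiler>", pvStr rolls 0, " +", " "] := by
          simp [pvPiece, hhd, hgc, h0N', hh1]
        rw [hE1, hp, pv_join_four, pv_jr_nil]
        apply String.toList_inj.mp
        simp [pv_tl_empty]
    | false =>
      right; right
      refine ⟨rfl, rfl, [], "", pvStr rolls 0 ++ " +", Or.inl rfl,
        pv_wordish_snoc_plus _ (pv_wordish_str rolls 0), ?_, ?_⟩
      · rw [show (("" : String) ++ (pvStr rolls 0 ++ " +") ++ " ") = pvStr rolls 0 ++ " + " from by
          apply String.toList_inj.mp; simp [pv_tl_empty, pv_tl_sp, pv_tl_spc, pv_tl_pp]]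
        simp
      · have hp : pvPiece rolls kept lk N 0 = ["<tg-spoiler>", pvStr rolls 0, " +", "</tg-spoiler> "] := by
          simp [pvPiece, hhd, hgc, h0N', hh1]
        rw [hE1, hp, pv_join_four, pv_jr_nil]
        apply String.toList_inj.mp
        simp [pv_tl_empty]

set_option maxHeartbeats 2000000 in
theorem pv_inv_step (rolls kept : List Int) (lk N a : Int) (h1 : 1 ≤ a) (h2 : a < N - 1)
    (m : List (String × Bool)) (hInv : pvInv rolls kept lk N a m) :
    pvInv rolls kept lk N (a + 1) (List.foldl pvMergeStep m (pvTok rolls kept lk N a)) := by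
  have hE := pv_E_succ rolls kept lk N a (by omega)
  have ha0 : (a == (0 : Int)) = false := beq_eq_false_iff_ne.mpr (by omega)
  have haN : (a == N - 1) = false := beq_eq_false_iff_ne.mpr (by omega)
  have htok : pvTok rolls kept lk N a = [(pvStr rolls a, pvHd kept a), ((" + " : String), pvGc kept lk a)] := by
    unfold pvTok
    rw [if_pos h2]
  unfold pvInv at hInv ⊢
  rw [show (a + 1 : Int) - 1 = a from by ring, htok]
  simp only [List.foldl_cons, List.foldl_nil]
  rcases hInv with ⟨hg, m₀, v, hm, hEa⟩ | ⟨hg, hda, m₀, L, S, hLor, hW, hm, hEa⟩ |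
    ⟨hg, hda, m₀, L, S, hLor, hW, hm, hEa⟩
  · -- state V : last run visible
    subst hm
    cases hhd : pvHd kept a with
    | false =>
      rw [pv_merge_same]
      cases hgc : pvGc kept lk a with
      | false =>
        rw [pv_merge_same]
        left
        refine ⟨rfl, m₀, v ++ pvStr rolls a ++ " + ", by simp, ?_⟩
        have hp : pvPiece rolls kept lk N a = [pvStr rolls a, " + "] := by
          simp [pvPiece, hhd, hgc, ha0, haN]
        rw [hE, hEa, hp, pv_join_two]
        apply String.toList_inj.mp; simp
      | true =>
        rw [pv_merge_diff _ _ _ _ _ (by simp)]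
        cases hh1 : pvHd kept (a + 1) with
        | true =>
          right; left
          refine ⟨rfl, rfl, m₀ ++ [(v ++ pvStr rolls a, false)], " ", "+", Or.inr rfl,
            pv_wordish_plus, ?_, ?_⟩
          · rw [show ((" " : String) ++ "+" ++ " ") = " + " from by
              apply String.toList_inj.mp; simp [pv_tl_spc, pv_tl_plus, pv_tl_pp]]
            simp
          · have hp : pvPiece rolls kept lk N a = [pvStr rolls a, " <tg-spoiler>+", " "] := by
              simp [pvPiece, hhd, hgc, ha0, haN, hh1]
            rw [hE, hEa, hp, pv_join_three, pv_jr_snoc_vis]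
            apply String.toList_inj.mp
            simp [pv_tl_spc, pv_tl_open]
        | false =>
          right; right
          refine ⟨rfl, rfl, m₀ ++ [(v ++ pvStr rolls a, false)], " ", "+", Or.inr rfl,
            pv_wordish_plus, ?_, ?_⟩
          · rw [show ((" " : String) ++ "+" ++ " ") = " + " from by
              apply String.toList_inj.mp; simp [pv_tl_spc, pv_tl_plus, pv_tl_pp]]
            simp
          · have hp : pvPiece rolls kept lk N a = [pvStr rolls a, " <tg-spoiler>+", "</tg-spoiler> "] := by
              simp [pvPiece, hhd, hgc, ha0, haN, hh1]
            rw [hE, hEa, hp, pv_join_three, pv_jr_snoc_vis]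
            apply String.toList_inj.mp
            simp [pv_tl_spc, pv_tl_open, pv_tl_ctagsp]
    | true =>
      have hgc : pvGc kept lk a = true := pv_hd_imp_gc kept lk a hhd
      rw [hgc, pv_merge_diff _ _ _ _ _ (by simp),
        show m₀ ++ [(v, false), (pvStr rolls a, true)]
          = (m₀ ++ [(v, false)]) ++ [(pvStr rolls a, true)] from by simp,
        pv_merge_same]
      cases hh1 : pvHd kept (a + 1) with
      | true =>
        right; left
        refine ⟨rfl, rfl, m₀ ++ [(v, false)], "", pvStr rolls a ++ " +", Or.inl rfl,
          pv_wordish_snoc_plus _ (pv_wordish_str rolls a), ?_, ?_⟩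
        · rw [show (("" : String) ++ (pvStr rolls a ++ " +") ++ " ") = pvStr rolls a ++ " + " from by
            apply String.toList_inj.mp; simp [pv_tl_empty, pv_tl_sp, pv_tl_spc, pv_tl_pp]]
        · have hp : pvPiece rolls kept lk N a = ["<tg-spoiler>", pvStr rolls a, " +", " "] := by
            simp [pvPiece, hhd, hgc, hg, ha0, haN, hh1]
          rw [hE, hEa, hp, pv_join_four, pv_jr_snoc_vis]
          apply String.toList_inj.mp
          simp [pv_tl_empty]
      | false =>
        right; right
        refine ⟨rfl, rfl, m₀ ++ [(v, false)], "", pvStr rolls a ++ " +", Or.inl rfl,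
          pv_wordish_snoc_plus _ (pv_wordish_str rolls a), ?_, ?_⟩
        · rw [show (("" : String) ++ (pvStr rolls a ++ " +") ++ " ") = pvStr rolls a ++ " + " from by
            apply String.toList_inj.mp; simp [pv_tl_empty, pv_tl_sp, pv_tl_spc, pv_tl_pp]]
        · have hp : pvPiece rolls kept lk N a = ["<tg-spoiler>", pvStr rolls a, " +", "</tg-spoiler> "] := by
            simp [pvPiece, hhd, hgc, hg, ha0, haN, hh1]
          rw [hE, hEa, hp, pv_join_four, pv_jr_snoc_vis]
          apply String.toList_inj.mp
          simp [pv_tl_empty]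
  · -- state HH : hidden run open, current die hidden
    subst hm
    rw [hda, pv_merge_same]
    have hgc : pvGc kept lk a = true := pv_hd_imp_gc kept lk a hda
    rw [hgc, pv_merge_same]
    cases hh1 : pvHd kept (a + 1) with
    | true =>
      right; left
      refine ⟨rfl, rfl, m₀, L, S ++ " " ++ pvStr rolls a ++ " +", hLor,
        pv_wordish_snoc_plus _ (pv_wordish_mid _ _ hW (pv_wordish_str rolls a)), ?_, ?_⟩
      · rw [show (L ++ S ++ " " ++ pvStr rolls a ++ " + ")
            = L ++ (S ++ " " ++ pvStr rolls a ++ " +") ++ " " from by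
          apply String.toList_inj.mp; simp [pv_tl_spc, pv_tl_sp, pv_tl_pp]]
      · have hp : pvPiece rolls kept lk N a = [pvStr rolls a, " +", " "] := by
          simp [pvPiece, hda, hgc, hg, ha0, haN, hh1]
        rw [hE, hEa, hp, pv_join_three]
        apply String.toList_inj.mp
        simp [pv_tl_spc, pv_tl_sp]
    | false =>
      right; right
      refine ⟨rfl, rfl, m₀, L, S ++ " " ++ pvStr rolls a ++ " +", hLor,
        pv_wordish_snoc_plus _ (pv_wordish_mid _ _ hW (pv_wordish_str rolls a)), ?_, ?_⟩
      · rw [show (L ++ S ++ " " ++ pvStr rolls a ++ " + ")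
            = L ++ (S ++ " " ++ pvStr rolls a ++ " +") ++ " " from by
          apply String.toList_inj.mp; simp [pv_tl_spc, pv_tl_sp, pv_tl_pp]]
      · have hp : pvPiece rolls kept lk N a = [pvStr rolls a, " +", "</tg-spoiler> "] := by
          simp [pvPiece, hda, hgc, hg, ha0, haN, hh1]
        rw [hE, hEa, hp, pv_join_three]
        apply String.toList_inj.mp
        simp [pv_tl_spc, pv_tl_sp, pv_tl_ctagsp]
  · -- state HV : hidden run just closed by B, current die visible
    subst hm
    rw [hda, pv_merge_diff _ _ _ _ _ (by simp),
      show m₀ ++ [(L ++ S ++ " ", true), (pvStr rolls a, false)]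
        = (m₀ ++ [(L ++ S ++ " ", true)]) ++ [(pvStr rolls a, false)] from by simp]
    have hjrm : pvJR (m₀ ++ [(L ++ S ++ " ", true)])
        = pvJR m₀ ++ L ++ "<tg-spoiler>" ++ S ++ "</tg-spoiler> " := by
      rw [pv_jr_snoc_hid, pv_renderChunk_decomp (L ++ S ++ " ") L S " " (by simp) hLor
        (Or.inr rfl) hW]
      apply String.toList_inj.mp
      simp [pv_tl_spc, pv_tl_ctagsp]
    cases hgc : pvGc kept lk a with
    | false =>
      rw [pv_merge_same]
      left
      refine ⟨rfl, m₀ ++ [(L ++ S ++ " ", true)], pvStr rolls a ++ " + ", by simp, ?_⟩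
      have hp : pvPiece rolls kept lk N a = [pvStr rolls a, " + "] := by
        simp [pvPiece, hda, hgc, ha0, haN]
      rw [hE, hEa, hp, pv_join_two, hjrm]
    | true =>
      rw [pv_merge_diff _ _ _ _ _ (by simp),
        show (m₀ ++ [(L ++ S ++ " ", true)]) ++ [(pvStr rolls a, false), ((" + " : String), true)]
          = ((m₀ ++ [(L ++ S ++ " ", true)]) ++ [(pvStr rolls a, false)]) ++ [((" + " : String), true)] from by simp]
      cases hh1 : pvHd kept (a + 1) with
      | true =>
        right; left
        refine ⟨rfl, rfl, (m₀ ++ [(L ++ S ++ " ", true)]) ++ [(pvStr rolls a, false)], " ", "+",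
          Or.inr rfl, pv_wordish_plus, ?_, ?_⟩
        · rw [show ((" " : String) ++ "+" ++ " ") = " + " from by
            apply String.toList_inj.mp; simp [pv_tl_spc, pv_tl_plus, pv_tl_pp]]
        · have hp : pvPiece rolls kept lk N a = [pvStr rolls a, " <tg-spoiler>+", " "] := by
            simp [pvPiece, hda, hgc, ha0, haN, hh1]
          rw [hE, hEa, hp, pv_join_three, pv_jr_snoc_vis, hjrm]
          apply String.toList_inj.mp
          simp [pv_tl_spc, pv_tl_open, pv_tl_ctagsp]
      | false =>
        right; right
        refine ⟨rfl, rfl, (m₀ ++ [(L ++ S ++ " ", true)]) ++ [(pvStr rolls a, false)], " ", "+",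
          Or.inr rfl, pv_wordish_plus, ?_, ?_⟩
        · rw [show ((" " : String) ++ "+" ++ " ") = " + " from by
            apply String.toList_inj.mp; simp [pv_tl_spc, pv_tl_plus, pv_tl_pp]]
        · have hp : pvPiece rolls kept lk N a = [pvStr rolls a, " <tg-spoiler>+", "</tg-spoiler> "] := by
            simp [pvPiece, hda, hgc, ha0, haN, hh1]
          rw [hE, hEa, hp, pv_join_three, pv_jr_snoc_vis, hjrm]
          apply String.toList_inj.mp
          simp [pv_tl_spc, pv_tl_open, pv_tl_ctagsp]

theorem pv_inv_all (rolls kept : List Int) (lk N : Int) (hN : 2 ≤ N) :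
    ∀ k : Nat, (k : Int) ≤ N - 2 → pvInv rolls kept lk N (1 + k) (pvM rolls kept lk N (1 + k)) := by
  intro k
  induction k with
  | zero =>
    intro _
    simpa using pv_inv_base rolls kept lk N hN
  | succ k ih =>
    intro hk
    have hk' : (k : Int) ≤ N - 2 := by push_cast at hk ⊢; omega
    have := pv_inv_step rolls kept lk N (1 + k) (by omega) (by push_cast at hk ⊢; omega)
      _ (ih hk')
    rw [← pv_M_succ rolls kept lk N (1 + k) (by omega)] at this
    have hcast : (1 : Int) + (k : Int) + 1 = 1 + ((k + 1 : Nat) : Int) := by push_cast; ring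
    rw [hcast] at this
    exact this

set_option maxHeartbeats 1000000 in
theorem pv_core (rolls kept : List Int) (lk N : Int) (hN : 2 ≤ N) :
    PySem.Str.join "" (List.foldl pvRenderStep []
        (List.foldl pvMergeStep [] ((PySem.List.pyRange 0 N).flatMap (pvTok rolls kept lk N))))
      = pvE rolls kept lk N N := by
  have hInv := pv_inv_all rolls kept lk N hN (N - 2).toNat
    (by rw [Int.toNat_of_nonneg (by omega)])
  rw [show (1 : Int) + ((N - 2).toNat : Int) = N - 1 from by omega] at hInv
  have hsplitR : PySem.List.pyRange 0 N = PySem.List.pyRange 0 (N - 1) ++ [N - 1] := by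
    have h := PySem.List.pyRange_one_succ_right (a := (0 : Int)) (b := N - 1) (by omega)
    rw [show (N - 1 : Int) + 1 = N from by ring] at h
    exact h
  have htokN : pvTok rolls kept lk N (N - 1) = [(pvStr rolls (N - 1), pvHd kept (N - 1))] := by
    unfold pvTok
    rw [if_neg (lt_irrefl _)]
  have hEN : pvE rolls kept lk N N
      = pvE rolls kept lk N (N - 1) ++ PySem.Str.join "" (pvPiece rolls kept lk N (N - 1)) := by
    have h := pv_E_succ rolls kept lk N (N - 1) (by omega)
    rw [show (N - 1 : Int) + 1 = N from by ring] at h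
    exact h
  have hN0 : ((N - 1 : Int) == 0) = false := beq_eq_false_iff_ne.mpr (by omega)
  have hNN : ((N - 1 : Int) == N - 1) = true := beq_self_eq_true _
  rw [hsplitR, List.flatMap_append, List.foldl_append]
  have hpre : List.foldl pvMergeStep [] ((PySem.List.pyRange 0 (N - 1)).flatMap (pvTok rolls kept lk N))
      = pvM rolls kept lk N (N - 1) := rfl
  rw [hpre, show ([N - 1] : List Int).flatMap (pvTok rolls kept lk N) = pvTok rolls kept lk N (N - 1) from by simp,
    htokN]
  simp only [List.foldl_cons, List.foldl_nil]
  unfold pvInv at hInv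
  rcases hInv with ⟨hg, m₀, v, hm, hEa⟩ | ⟨hg, hda, m₀, L, S, hLor, hW, hm, hEa⟩ |
    ⟨hg, hda, m₀, L, S, hLor, hW, hm, hEa⟩
  · rw [hm]
    cases hhd : pvHd kept (N - 1) with
    | false =>
      rw [pv_merge_same]
      have hp : pvPiece rolls kept lk N (N - 1) = [pvStr rolls (N - 1)] := by
        simp [pvPiece, hhd, hN0, hNN]
      rw [show PySem.Str.join "" (List.foldl pvRenderStep [] (m₀ ++ [(v ++ pvStr rolls (N - 1), false)]))
          = pvJR (m₀ ++ [(v ++ pvStr rolls (N - 1), false)]) from rfl,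
        pv_jr_snoc_vis, hEN, hEa, hp, pv_join_one]
      apply String.toList_inj.mp
      simp
    | true =>
      rw [pv_merge_diff _ _ _ _ _ (by simp),
        show m₀ ++ [(v, false), (pvStr rolls (N - 1), true)]
          = (m₀ ++ [(v, false)]) ++ [(pvStr rolls (N - 1), true)] from by simp]
      have hp : pvPiece rolls kept lk N (N - 1)
          = ["<tg-spoiler>", pvStr rolls (N - 1), "</tg-spoiler>"] := by
        simp [pvPiece, hhd, hg, hN0, hNN]
      rw [show PySem.Str.join "" (List.foldl pvRenderStep []
            ((m₀ ++ [(v, false)]) ++ [(pvStr rolls (N - 1), true)]))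
          = pvJR ((m₀ ++ [(v, false)]) ++ [(pvStr rolls (N - 1), true)]) from rfl,
        pv_jr_snoc_hid,
        pv_renderChunk_decomp (pvStr rolls (N - 1)) "" (pvStr rolls (N - 1)) ""
          (by simp [pv_tl_empty]) (Or.inl rfl) (Or.inl rfl) (pv_wordish_str rolls (N - 1)),
        pv_jr_snoc_vis, hEN, hEa, hp, pv_join_three]
      apply String.toList_inj.mp
      simp [pv_tl_empty]
  · -- HH : run still open, last die hidden
    rw [hm, hda, pv_merge_same]
    have hp : pvPiece rolls kept lk N (N - 1) = [pvStr rolls (N - 1), "</tg-spoiler>"] := by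
      simp [pvPiece, hda, hg, hN0, hNN]
    rw [show PySem.Str.join "" (List.foldl pvRenderStep []
          (m₀ ++ [(L ++ S ++ " " ++ pvStr rolls (N - 1), true)]))
        = pvJR (m₀ ++ [(L ++ S ++ " " ++ pvStr rolls (N - 1), true)]) from rfl,
      pv_jr_snoc_hid,
      pv_renderChunk_decomp (L ++ S ++ " " ++ pvStr rolls (N - 1)) L
        (S ++ " " ++ pvStr rolls (N - 1)) ""
        (by simp [pv_tl_empty, pv_tl_spc]) hLor (Or.inl rfl)
        (pv_wordish_mid _ _ hW (pv_wordish_str rolls (N - 1))),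
      hEN, hEa, hp, pv_join_two]
    apply String.toList_inj.mp
    simp [pv_tl_empty, pv_tl_spc]
  · -- HV : run closed, last die visible
    rw [hm, hda, pv_merge_diff _ _ _ _ _ (by simp),
      show m₀ ++ [(L ++ S ++ " ", true), (pvStr rolls (N - 1), false)]
        = (m₀ ++ [(L ++ S ++ " ", true)]) ++ [(pvStr rolls (N - 1), false)] from by simp]
    have hp : pvPiece rolls kept lk N (N - 1) = [pvStr rolls (N - 1)] := by
      simp [pvPiece, hda, hN0, hNN]
    rw [show PySem.Str.join "" (List.foldl pvRenderStep []
          ((m₀ ++ [(L ++ S ++ " ", true)]) ++ [(pvStr rolls (N - 1), false)]))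
        = pvJR ((m₀ ++ [(L ++ S ++ " ", true)]) ++ [(pvStr rolls (N - 1), false)]) from rfl,
      pv_jr_snoc_vis, pv_jr_snoc_hid,
      pv_renderChunk_decomp (L ++ S ++ " ") L S " " (by simp) hLor (Or.inr rfl) hW,
      hEN, hEa, hp, pv_join_one]
    apply String.toList_inj.mp
    simp [pv_tl_spc, pv_tl_ctagsp]

-- ---- last_kept vs pvHKA ----

theorem pv_lk_lt (kept : List Int) (N j : Int) (hj : 0 ≤ j) :
    decide (j < pvLK kept N) = pvHKA kept N j := by
  unfold pvLK pvHKA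
  apply Bool.coe_iff_coe.mp
  simp only [decide_eq_true_eq, List.any_eq_true, Bool.and_eq_true]
  cases hmax : PySem.List.max? (kept.filter (fun i => decide (0 ≤ i) && decide (i < N))) (fun i => i) with
  | none =>
    rw [PySem.List.max?_eq_none_iff] at hmax
    simp only [Option.getD_none]
    constructor
    · intro h; omega
    · rintro ⟨i, hi, h1, h2⟩
      exfalso
      have : i ∈ kept.filter (fun i => decide (0 ≤ i) && decide (i < N)) := by
        simp [List.mem_filter, hi]; omega
      rw [hmax] at this
      simp at this
  | some m =>
    have hmem := PySem.List.max?_mem hmax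
    have hmax' := PySem.List.max?_isMax hmax
    simp only [List.mem_filter, Bool.and_eq_true, decide_eq_true_eq] at hmem
    simp only [Option.getD_some]
    constructor
    · intro h
      exact ⟨m, hmem.1, h, hmem.2.2⟩
    · rintro ⟨i, hi, h1, h2⟩
      have : i ∈ kept.filter (fun i => decide (0 ≤ i) && decide (i < N)) := by
        simp [List.mem_filter, hi]; omega
      have := hmax' i this
      simp at this
      omega

-- A's connector formula collapses to B's closed-form test
theorem pv_vis_eq_gc (kept : List Int) (N i : Int) (h0 : 0 ≤ i) (h1 : i < N - 1) :
    (!(pvVis kept (pvLK kept N) i)) = pvGc kept (pvLK kept N) i := by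
  unfold pvVis pvGc
  congr 1
  rw [pv_lk_lt kept N (i + 1) (by omega), pv_lk_lt kept N i h0]
  cases hc : kept.contains i
  · simp
  · simp only [Bool.true_and]
    apply Bool.coe_iff_coe.mp
    unfold pvHKA
    simp only [Bool.or_eq_true, List.any_eq_true, Bool.and_eq_true, decide_eq_true_eq,
      List.contains_iff_mem]
    constructor
    · rintro (hm | ⟨x, hx, hx1, hx2⟩)
      · exact ⟨i + 1, hm, by omega, by omega⟩
      · exact ⟨x, hx, by omega, hx2⟩
    · rintro ⟨x, hx, hx1, hx2⟩
      by_cases he : x = i + 1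
      · exact Or.inl (he ▸ hx)
      · exact Or.inr ⟨x, hx, by omega, hx2⟩

-- ---- right_kept backward pass (A-side characterization) ----

theorem pv_rkFold (kept : List Int) (N : Int) (a : Nat) (ha : (a : Int) ≤ N) :
    ∀ (l : List Bool), (l.length : Int) = N →
    ∀ (fnd : Bool), fnd = (kept.any fun i => decide ((a : Int) ≤ i) && decide (i < N)) →
    ∀ j : Nat,
    (((PySem.List.pyRange ((a : Int) - 1) (-1) (-1)).foldl
        (fun (s : List Bool × Bool) i =>
          (PySem.List.pySetD s.1 i s.2, if kept.contains i then true else s.2))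
        (l, fnd)).1).getD j false
      = if j < a then pvHKA kept N j else l.getD j false := by
  induction a with
  | zero =>
    intro l hlen fnd hfnd j
    rw [show ((0 : Nat) : Int) - 1 = -1 by norm_num, PySem.List.pyRange_neg_one_eq_nil le_rfl]
    simp
  | succ a ih =>
    intro l hlen fnd hfnd j
    have ha' : (a : Int) ≤ N := by push_cast at ha ⊢; omega
    have haN : (a : Int) < N := by push_cast at ha; omega
    have hcast : ((a + 1 : Nat) : Int) - 1 = (a : Int) := by push_cast; ring
    rw [hcast, PySem.List.pyRange_neg_one_cons (by omega)]
    simp only [List.foldl_cons]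
    have hfnd' : (if kept.contains (a : Int) then true else fnd)
        = (kept.any fun i => decide ((a : Int) ≤ i) && decide (i < N)) := by
      rw [show (if kept.contains (a : Int) then true else fnd) = (kept.contains (a : Int) || fnd)
        from by cases kept.contains (a : Int) <;> rfl]
      subst hfnd
      apply Bool.coe_iff_coe.mp
      simp only [Bool.or_eq_true, List.any_eq_true, Bool.and_eq_true, decide_eq_true_eq,
        List.contains_iff_mem]
      constructor
      · rintro (hc | ⟨i, hi, h1, h2⟩)
        · exact ⟨_, hc, le_rfl, haN⟩
        · exact ⟨i, hi, by push_cast at h1 ⊢; omega, h2⟩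
      · rintro ⟨i, hi, h1, h2⟩
        by_cases he : i = (a : Int)
        · exact Or.inl (he ▸ hi)
        · exact Or.inr ⟨i, hi, by push_cast at h1 ⊢; omega, h2⟩
    rw [show PySem.List.pySetD l ((a : Nat) : Int) fnd = l.set a fnd from PySem.List.pySetD_natCast l a fnd]
    rw [ih ha' (l.set a fnd) (by simpa using hlen) _ hfnd' j]
    have hal : a < l.length := by omega
    by_cases hja : j < a
    · simp [hja, show j < a + 1 by omega]
    · by_cases hje : j = a
      · subst hje
        rw [if_neg (lt_irrefl _), if_pos (Nat.lt_succ_self _)]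
        rw [List.getD_eq_getElem?_getD, List.getElem?_set_self (by omega)]
        simp only [Option.getD_some]
        rw [hfnd]
        unfold pvHKA
        apply PySem.List.any_congr_mem
        intro i hi
        apply Bool.coe_iff_coe.mp
        simp only [Bool.and_eq_true, decide_eq_true_eq]
        constructor <;> (rintro ⟨h1, h2⟩; push_cast at h1 ⊢; omega)
      · rw [if_neg (by omega), if_neg (by omega)]
        rw [List.getD_eq_getElem?_getD, List.getD_eq_getElem?_getD,
          List.getElem?_set_ne (by omega)]

-- ---- visible_plus forward pass (A-side characterization) ----

-- A's formula with right_kept expanded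
theorem pv_visA_eq (kept : List Int) (N j : Int) (hj : 0 ≤ j) (hjN : j < N - 1) :
    pvVisA kept N j = pvVis kept (pvLK kept N) j := by
  unfold pvVisA pvVis
  rw [pv_lk_lt kept N (j + 1) (by omega)]
  cases kept.contains j <;> cases kept.contains (j + 1) <;> cases pvHKA kept N (j + 1) <;> rfl

def pvVpStep (kept : List Int) (N : Int) (vp : List Bool) (k : Int) : List Bool :=
  if kept.contains k && kept.contains (k + 1) then PySem.List.pySetD vp k true
  else if kept.contains k && !(kept.contains (k + 1)) && pvHKA kept N (k + 1) then
    PySem.List.pySetD vp k true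
  else vp

theorem pv_vpStep_len (kept : List Int) (N : Int) (vp : List Bool) (a : Nat) :
    (pvVpStep kept N vp (a : Int)).length = vp.length := by
  unfold pvVpStep
  rw [PySem.List.pySetD_natCast]
  split_ifs <;> simp

theorem pv_vpStep_getD (kept : List Int) (N : Int) (l : List Bool) (a : Nat)
    (hal : a < l.length) (hfa : l.getD a false = false) :
    ∀ jj : Nat, (pvVpStep kept N l (a : Int)).getD jj false
      = if jj = a then pvVisA kept N (a : Int) else l.getD jj false := by
  intro jj
  unfold pvVpStep pvVisA
  rw [show PySem.List.pySetD l ((a : Nat) : Int) true = l.set a true from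
    PySem.List.pySetD_natCast l a true]
  cases hak : kept.contains (a : Int) <;>
    cases hbk : kept.contains ((a : Int) + 1) <;>
    cases hh : pvHKA kept N ((a : Int) + 1) <;>
    simp only [hak, hbk, hh, Bool.and_self, Bool.and_true, Bool.true_and, Bool.and_false,
      Bool.false_and, Bool.not_true, Bool.not_false, Bool.or_false, Bool.false_or, Bool.true_or,
      Bool.or_true, reduceIte] <;>
    (by_cases hje : jj = a
     · subst hje
       rw [List.getD_eq_getElem?_getD] at hfa
       simp [List.getD_eq_getElem?_getD, List.getElem?_set_self hal, hfa]
     · simp [List.getD_eq_getElem?_getD, List.getElem?_set_ne (show a ≠ jj from fun h2 => hje h2.symm), hje])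

theorem pv_vpFold (kept : List Int) (N : Int) (cnt : Nat) :
    ∀ (a : Nat) (l : List Bool), ((N - 1) - a).toNat = cnt → (l.length : Int) = N - 1 →
    (∀ j : Nat, a ≤ j → l.getD j false = false) →
    ∀ j : Nat,
    ((PySem.List.pyRange (a : Int) (N - 1)).foldl (pvVpStep kept N) l).getD j false
      = if a ≤ j ∧ (j : Int) < N - 1 then pvVisA kept N (j : Int) else l.getD j false := by
  induction cnt with
  | zero =>
    intro a l hcnt hlen hfalse j
    rw [PySem.List.pyRange_one_eq_nil (by omega)]
    simp only [List.foldl_nil]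
    rw [if_neg (by rintro ⟨h1, h2⟩; omega)]
  | succ cnt ih =>
    intro a l hcnt hlen hfalse j
    have hlt : (a : Int) < N - 1 := by omega
    rw [PySem.List.pyRange_one_cons hlt]
    simp only [List.foldl_cons]
    have hal : a < l.length := by omega
    have hgetd := pv_vpStep_getD kept N l a hal (hfalse a le_rfl)
    rw [show ((a : Int) + 1) = ((a + 1 : Nat) : Int) by push_cast; ring]
    rw [ih (a + 1) (pvVpStep kept N l (a : Int)) (by omega)
      (by rw [pv_vpStep_len kept N l a]; exact hlen)
      (fun jj hjj => by rw [hgetd jj, if_neg (by omega)]; exact hfalse jj (by omega)) j]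
    by_cases h1 : (a + 1) ≤ j ∧ (j : Int) < N - 1
    · rw [if_pos h1, if_pos (by omega)]
    · rw [if_neg h1]
      by_cases h2 : a ≤ j ∧ (j : Int) < N - 1
      · have hja : j = a := by omega
        subst hja
        rw [if_pos h2, hgetd j, if_pos rfl]
      · rw [if_neg h2, hgetd j, if_neg (by omega)]

theorem pv_flatMap_congr {α β : Type} (l : List α) (f g : α → List β)
    (h : ∀ x ∈ l, f x = g x) : l.flatMap f = l.flatMap g := by
  rw [List.flatMap_def, List.flatMap_def, List.map_congr_left h]

set_option maxHeartbeats 2000000 in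
theorem pv_main (rolls : List Int) (kept : List Int) :
    render_dice_fragment_py rolls kept = render_dice_fragment_py_alt rolls kept := by
  by_cases h0 : rolls.length = 0
  · unfold render_dice_fragment_py render_dice_fragment_py_alt
    simp only [PySem.List.len_eq, h0, Nat.cast_zero]
    rfl
  · by_cases h1 : rolls.length = 1
    · unfold render_dice_fragment_py render_dice_fragment_py_alt
      simp only [PySem.List.len_eq, h1, Nat.cast_one]
      rfl
    · have h2 : 2 ≤ rolls.length := by omega
      have hN' : 2 ≤ (rolls.length : Int) := by exact_mod_cast h2
      have c0 : ((rolls.length : Int) == 0) = false := by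
        rw [beq_eq_false_iff_ne]; omega
      have c1 : ((rolls.length : Int) == 1) = false := by
        rw [beq_eq_false_iff_ne]; omega
      have h1 : List.foldl
            (fun (ps : List String) (i : Int) =>
              if i == (rolls.length : Int) - 1 then
                (if (!(kept.contains i)) then
                  ((if (!(kept.contains i)) && (i == 0 || !(!(kept.contains (i - 1) &&
                        decide (i - 1 < pvLK kept (rolls.length : Int))))) then
                      ps ++ ["<tg-spoiler>"] else ps)
                    ++ [PySem.Int.toStr (PySem.List.pyGetD rolls i 0)]) ++ ["</tg-spoiler>"]
                 else
                  (if (!(kept.contains i)) && (i == 0 || !(!(kept.contains (i - 1) &&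
                        decide (i - 1 < pvLK kept (rolls.length : Int))))) then
                      ps ++ ["<tg-spoiler>"] else ps)
                    ++ [PySem.Int.toStr (PySem.List.pyGetD rolls i 0)])
              else if !(!(kept.contains i && decide (i < pvLK kept (rolls.length : Int)))) then
                ((if (!(kept.contains i)) && (i == 0 || !(!(kept.contains (i - 1) &&
                      decide (i - 1 < pvLK kept (rolls.length : Int))))) then
                    ps ++ ["<tg-spoiler>"] else ps)
                  ++ [PySem.Int.toStr (PySem.List.pyGetD rolls i 0)]) ++ [" + "]
              else
                (((if (!(kept.contains i)) && (i == 0 || !(!(kept.contains (i - 1) &&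
                      decide (i - 1 < pvLK kept (rolls.length : Int))))) then
                    ps ++ ["<tg-spoiler>"] else ps)
                  ++ [PySem.Int.toStr (PySem.List.pyGetD rolls i 0)])
                  ++ [if !(!(kept.contains i)) then " <tg-spoiler>+" else " +"])
                  ++ [if !(!(kept.contains (i + 1))) then "</tg-spoiler> " else " "])
            [] (PySem.List.pyRange 0 (rolls.length : Int))
          = (PySem.List.pyRange 0 (rolls.length : Int)).flatMap
              (pvPiece rolls kept (pvLK kept (rolls.length : Int)) (rolls.length : Int)) := by
        rw [← List.nil_append (List.flatMap
          (pvPiece rolls kept (pvLK kept (rolls.length : Int)) (rolls.length : Int))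
          (PySem.List.pyRange 0 (rolls.length : Int))),
          ← PySem.List.foldl_append_eq_flatMap
          (pvPiece rolls kept (pvLK kept (rolls.length : Int)) (rolls.length : Int))
          (PySem.List.pyRange 0 (rolls.length : Int)) []]
        apply PySem.List.foldl_congr_mem
        intro ps i hi
        simp only [pvPiece, pvHd, pvGc, pvStr]
        split_ifs <;> simp [List.append_assoc]
      have hBeq : render_dice_fragment_py_alt rolls kept
          = "(" ++ PySem.Str.join "" ((PySem.List.pyRange 0 (rolls.length : Int)).flatMap
              (pvPiece rolls kept (pvLK kept (rolls.length : Int)) (rolls.length : Int))) ++ ")" := by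
        unfold render_dice_fragment_py_alt
        simp only [PySem.List.len_eq, c0, c1, Bool.false_eq_true, if_false]
        exact congrArg (fun l => "(" ++ PySem.Str.join "" l ++ ")") h1
      rw [hBeq]
      unfold render_dice_fragment_py
      simp only [PySem.List.len_eq, c0, c1, Bool.false_eq_true, if_false]
      have hrkget : ∀ j : Nat, j < rolls.length →
          ((List.foldl
              (fun (s : List Bool × Bool) i =>
                (PySem.List.pySetD s.1 i s.2, if kept.contains i then true else s.2))
              (List.replicate ((rolls.length : Int)).toNat false, false)
              (PySem.List.pyRange ((rolls.length : Int) - 1) (-1) (-1))).1).getD j false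
            = pvHKA kept (rolls.length : Int) (j : Int) := by
        intro j hj
        have hfnd : (false : Bool)
            = (kept.any fun i => decide ((rolls.length : Int) ≤ i) && decide (i < (rolls.length : Int))) := by
          apply Eq.symm
          rw [Bool.eq_false_iff]
          intro hc
          simp only [List.any_eq_true, Bool.and_eq_true, decide_eq_true_eq] at hc
          obtain ⟨i, _, hle, hlt⟩ := hc
          omega
        have := pv_rkFold kept (rolls.length : Int) rolls.length le_rfl
          (List.replicate ((rolls.length : Int)).toNat false) (by simp)
          false hfnd j
        rw [this, if_pos hj]
      have hVP : List.foldl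
            (fun vp k =>
              if kept.contains k && kept.contains (k + 1) then PySem.List.pySetD vp k true
              else if kept.contains k && !(kept.contains (k + 1)) &&
                  PySem.List.pyGetD
                    ((List.foldl
                        (fun (s : List Bool × Bool) i =>
                          (PySem.List.pySetD s.1 i s.2, if kept.contains i then true else s.2))
                        (List.replicate ((rolls.length : Int)).toNat false, false)
                        (PySem.List.pyRange ((rolls.length : Int) - 1) (-1) (-1))).1)
                    (k + 1) false then
                PySem.List.pySetD vp k true
              else vp)
            (List.replicate ((rolls.length : Int) - 1).toNat false)
            (PySem.List.pyRange 0 ((rolls.length : Int) - 1))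
          = List.foldl (pvVpStep kept (rolls.length : Int))
            (List.replicate ((rolls.length : Int) - 1).toNat false)
            (PySem.List.pyRange 0 ((rolls.length : Int) - 1)) := by
        apply PySem.List.foldl_congr_mem
        intro vp k hk
        rw [PySem.List.mem_pyRange_one] at hk
        have hcast : (((k + 1).toNat : Nat) : Int) = k + 1 := Int.toNat_of_nonneg (by omega)
        have : PySem.List.pyGetD
            ((List.foldl
                (fun (s : List Bool × Bool) i =>
                  (PySem.List.pySetD s.1 i s.2, if kept.contains i then true else s.2))
                (List.replicate ((rolls.length : Int)).toNat false, false)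
                (PySem.List.pyRange ((rolls.length : Int) - 1) (-1) (-1))).1)
              (k + 1) false = pvHKA kept (rolls.length : Int) (k + 1) := by
          rw [← hcast, PySem.List.pyGetD_natCast]
          rw [hrkget (k + 1).toNat (by omega)]
        rw [this]
        rfl
      have hvpget : ∀ j : Nat, (j : Int) < (rolls.length : Int) - 1 →
          (List.foldl (pvVpStep kept (rolls.length : Int))
              (List.replicate ((rolls.length : Int) - 1).toNat false)
              (PySem.List.pyRange 0 ((rolls.length : Int) - 1))).getD j false
            = pvVisA kept (rolls.length : Int) (j : Int) := by
        intro j hj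
        have hrep : ∀ jj : Nat,
            (List.replicate ((rolls.length : Int) - 1).toNat false).getD jj false = false := by
          intro jj
          rcases hh : (List.replicate ((rolls.length : Int) - 1).toNat false)[jj]? with _ | x
          · simp [List.getD_eq_getElem?_getD, hh]
          · have := List.mem_of_getElem? hh
            rw [List.eq_of_mem_replicate this] at hh
            simp [List.getD_eq_getElem?_getD, hh]
        have := pv_vpFold kept (rolls.length : Int) ((rolls.length : Int) - 1).toNat 0
          (List.replicate ((rolls.length : Int) - 1).toNat false)
          (by simp) (by simp; omega) (fun jj _ => hrep jj) j
        rw [Nat.cast_zero] at this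
        rw [this, if_pos ⟨Nat.zero_le j, hj⟩]
      have hTok : List.foldl
            (fun (tks : List (String × Bool)) i =>
              if i < (rolls.length : Int) - 1 then
                tks ++ [(PySem.Int.toStr (PySem.List.pyGetD rolls i 0), !(kept.contains i))] ++
                  [(" + ", !(PySem.List.pyGetD
                    (List.foldl (pvVpStep kept (rolls.length : Int))
                      (List.replicate ((rolls.length : Int) - 1).toNat false)
                      (PySem.List.pyRange 0 ((rolls.length : Int) - 1))) i false))]
              else tks ++ [(PySem.Int.toStr (PySem.List.pyGetD rolls i 0), !(kept.contains i))])
            [] (PySem.List.pyRange 0 (rolls.length : Int))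
          = (PySem.List.pyRange 0 (rolls.length : Int)).flatMap
              (pvEmit rolls kept (rolls.length : Int) (pvLK kept (rolls.length : Int))) := by
        rw [← List.nil_append (List.flatMap
          (pvEmit rolls kept (rolls.length : Int) (pvLK kept (rolls.length : Int)))
          (PySem.List.pyRange 0 (rolls.length : Int))),
          ← PySem.List.foldl_append_eq_flatMap
          (pvEmit rolls kept (rolls.length : Int) (pvLK kept (rolls.length : Int)))
          (PySem.List.pyRange 0 (rolls.length : Int)) []]
        apply PySem.List.foldl_congr_mem
        intro tks i hi
        rw [PySem.List.mem_pyRange_one] at hi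
        unfold pvEmit pvStr
        by_cases hc : i < (rolls.length : Int) - 1
        · rw [if_pos hc, if_pos hc]
          have hcast : ((i.toNat : Nat) : Int) = i := Int.toNat_of_nonneg hi.1
          have : PySem.List.pyGetD
              (List.foldl (pvVpStep kept (rolls.length : Int))
                (List.replicate ((rolls.length : Int) - 1).toNat false)
                (PySem.List.pyRange 0 ((rolls.length : Int) - 1))) i false
              = pvVis kept (pvLK kept (rolls.length : Int)) i := by
            rw [← hcast, PySem.List.pyGetD_natCast, hvpget i.toNat (by omega),
              pv_visA_eq kept _ _ (by positivity) (by rw [hcast]; exact hc)]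
          rw [this]
          simp
        · rw [if_neg hc, if_neg hc]
      have hTok2 : List.foldl
            (fun (tks : List (String × Bool)) i =>
              if i < (rolls.length : Int) - 1 then
                tks ++ [(PySem.Int.toStr (PySem.List.pyGetD rolls i 0), !(kept.contains i))] ++
                  [(" + ", !(PySem.List.pyGetD
                    (List.foldl
                      (fun vp k =>
                        if kept.contains k && kept.contains (k + 1) then PySem.List.pySetD vp k true
                        else if kept.contains k && !(kept.contains (k + 1)) &&
                            PySem.List.pyGetD
                              ((List.foldl
                                  (fun (s : List Bool × Bool) i =>
                                    (PySem.List.pySetD s.1 i s.2, if kept.contains i then true else s.2))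
                                  (List.replicate ((rolls.length : Int)).toNat false, false)
                                  (PySem.List.pyRange ((rolls.length : Int) - 1) (-1) (-1))).1)
                              (k + 1) false then
                          PySem.List.pySetD vp k true
                        else vp)
                      (List.replicate ((rolls.length : Int) - 1).toNat false)
                      (PySem.List.pyRange 0 ((rolls.length : Int) - 1))) i false))]
              else tks ++ [(PySem.Int.toStr (PySem.List.pyGetD rolls i 0), !(kept.contains i))])
            [] (PySem.List.pyRange 0 (rolls.length : Int))
          = (PySem.List.pyRange 0 (rolls.length : Int)).flatMap
              (pvEmit rolls kept (rolls.length : Int) (pvLK kept (rolls.length : Int))) := by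
        rw [hVP]
        exact hTok
      have hEmit : (PySem.List.pyRange 0 (rolls.length : Int)).flatMap
            (pvEmit rolls kept (rolls.length : Int) (pvLK kept (rolls.length : Int)))
          = (PySem.List.pyRange 0 (rolls.length : Int)).flatMap
            (pvTok rolls kept (pvLK kept (rolls.length : Int)) (rolls.length : Int)) := by
        apply pv_flatMap_congr
        intro i hi
        rw [PySem.List.mem_pyRange_one] at hi
        unfold pvEmit pvTok pvHd
        by_cases hc : i < (rolls.length : Int) - 1
        · rw [if_pos hc, if_pos hc, pv_vis_eq_gc kept (rolls.length : Int) i hi.1 hc]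
        · rw [if_neg hc, if_neg hc]
      exact congrArg (fun s => "(" ++ s ++ ")")
        ((congrArg (fun ts => PySem.Str.join ""
            (List.foldl pvRenderStep [] (List.foldl pvMergeStep [] ts)))
            (hTok2.trans hEmit)).trans
          (pv_core rolls kept (pvLK kept (rolls.length : Int)) (rolls.length : Int) hN'))

-- ===== VERDICT (by name: the statement is the Claim_ definition above) =====
theorem render_dice_fragment_py_spec : Claim_equal_render_dice_fragment_py := by
  intro rolls kept _
  exact pv_main rolls kept
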